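-- pv_equiv track=rewrite | github.com/LongerVisionCanada/CCCJunior | 2015/J3.py | nextConsonant
-- ===== SOURCE A (Python) =====
-- def isVowel(c: str) -> bool:
--     if c == "a" or c == "e" or c == "i" or c == "o" or c == "u":
--         return True
--
--     return False
--
-- def nextConsonant(c: str) -> str:
--     if c == "z":
--         return "z"
--
--     d = 1
--     while True:
--         cn = chr(ord(c) + d)
--         if not isVowel(cn):
--             return cn
--         else:
--             d += 1
-- ===== SOURCE B (Python) =====
-- def nextConsonant(c: str) -> str:
--     if c == "z":
--         return "z"
--     n1 = chr(ord(c) + 1)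
--     return n1 if n1 not in "aeiou" else chr(ord(c) + 2)
-- ===== Notes on version B (the rewrite author's own statement) =====
-- stated objective: simpler
-- what changed: Replaces the unbounded while-loop search with a two-case closed form: try ord(c)+1, and since vowels are never adjacent in ASCII, fall back to ord(c)+2 at most once.
import Mathlib
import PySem

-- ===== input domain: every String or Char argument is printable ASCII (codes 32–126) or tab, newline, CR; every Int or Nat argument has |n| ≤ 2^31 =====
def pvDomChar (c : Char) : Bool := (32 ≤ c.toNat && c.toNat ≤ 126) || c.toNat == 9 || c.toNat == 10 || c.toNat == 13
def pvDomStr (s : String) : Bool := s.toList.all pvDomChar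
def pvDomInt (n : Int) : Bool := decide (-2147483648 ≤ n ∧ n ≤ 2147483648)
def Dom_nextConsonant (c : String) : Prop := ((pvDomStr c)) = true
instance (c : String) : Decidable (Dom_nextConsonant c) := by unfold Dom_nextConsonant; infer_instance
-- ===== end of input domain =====

-- B replaces A's unbounded while-loop with a closed two-case form (vowels are never adjacent in ASCII); objective: simpler.

-- ===== PORT A =====
-- isVowel(c)
def isVowelP (c : String) : Bool :=
  c == "a" || c == "e" || c == "i" || c == "o" || c == "u"

-- ord(c) for a one-character string (Pre_ guarantees length 1; Python raises otherwise)
def pyOrd (c : String) : Nat :=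
  match c.toList with
  | [ch] => ch.toNat
  | _ => 0

-- the 'while True' loop of A; it runs at most 2 iterations (two consecutive vowels do not exist),
-- so fuel 3 is a pure totality guard, never reached on Pre_ inputs
def nextConsonantLoop (o : Nat) (d : Nat) : Nat → String
  | 0 => ""
  | fuel + 1 =>
    let cn := String.ofList [Char.ofNat (o + d)]
    if !isVowelP cn then cn else nextConsonantLoop o (d + 1) fuel

def nextConsonant (c : String) : String :=
  if c == "z" then "z"
  else nextConsonantLoop (pyOrd c) 1 3

-- ===== PORT B =====
def nextConsonant_alt (c : String) : String :=
  if c == "z" then "z"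
  else
    let n1 := String.ofList [Char.ofNat (pyOrd c + 1)]
    if isVowelP n1 then String.ofList [Char.ofNat (pyOrd c + 2)] else n1

-- ===== PRECONDITION & SPEC =====
-- Pre_ excludes strings whose length is not 1, on which Python's ord(c) raises TypeError.
def Pre_nextConsonant (c : String) : Prop := c.length = 1 -- excluded: any other length, e.g. "ab" or "": ord(c) raises TypeError there
instance (c : String) : Decidable (Pre_nextConsonant c) := by unfold Pre_nextConsonant; infer_instance
def pvWitness_nextConsonant : String := "c"

def Spec_nextConsonant (c : String) (out : String) : Prop := out = nextConsonant_alt c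
instance (c : String) (out : String) : Decidable (Spec_nextConsonant c out) := by unfold Spec_nextConsonant; infer_instance

-- ===== CLAIM (what is proved, stated in full; the proofs are below) =====
def Claim_equal_nextConsonant : Prop := ∀ (c : String), Dom_nextConsonant c → Pre_nextConsonant c → Spec_nextConsonant c (nextConsonant c)

-- ===== LEMMAS AND PROOFS =====
-- over all domain codes the loop equals B's two-case form
lemma loop_eq_closed : ∀ n < 127,
    nextConsonantLoop n 1 3 =
      (if isVowelP (String.ofList [Char.ofNat (n + 1)])
       then String.ofList [Char.ofNat (n + 2)]
       else String.ofList [Char.ofNat (n + 1)]) := by decide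

lemma pyOrd_lt (c : String) (hd : Dom_nextConsonant c) (hp : Pre_nextConsonant c) :
    pyOrd c < 127 := by
  unfold Pre_nextConsonant at hp
  rw [← String.length_toList] at hp
  unfold Dom_nextConsonant pvDomStr at hd
  unfold pyOrd
  cases h : c.toList with
  | nil => rw [h] at hp; simp at hp
  | cons ch t =>
    cases t with
    | cons b t' => rw [h] at hp; simp at hp
    | nil =>
      rw [h] at hd
      simp [List.all, pvDomChar] at hd
      show ch.toNat < 127
      omega

-- ===== VERDICT (by name: the statement is the Claim_ definition above) =====
theorem nextConsonant_spec : Claim_equal_nextConsonant := by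
  intro c hd hp
  unfold Spec_nextConsonant nextConsonant nextConsonant_alt
  by_cases hz : c == "z"
  · simp [hz]
  · simp only [hz, if_false, Bool.false_eq_true]
    rw [loop_eq_closed (pyOrd c) (pyOrd_lt c hd hp)]
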